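-- pv_equiv track=rewrite | github.com/ylcheng/RewindPipeline | rewind_extractor.py | count_wsn_mismatches
-- ===== SOURCE A (Python) =====
-- W = set('AT')
--
-- S = set('GC')
--
-- def count_wsn_mismatches(sequence):
--     mismatches = 0
--     for i in range(0, len(sequence), 3):
--         if i < len(sequence) and sequence[i] not in W:
--             mismatches += 1
--         if i + 1 < len(sequence) and sequence[i + 1] not in S:
--             mismatches += 1
--         # N is skipped as it can be any nucleotide
--     return mismatches
-- ===== SOURCE B (Python) =====
-- W = set('AT')
--
-- S = set('GC')
--
-- def count_wsn_mismatches(sequence):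
--     return (sum(1 for c in sequence[0::3] if c not in W)
--             + sum(1 for c in sequence[1::3] if c not in S))
-- ===== Notes on version B (the rewrite author's own statement) =====
-- stated objective: idiomatic
-- what changed: Replaces the single stride-3 index loop with its two bounds-guarded offset checks by two independent passes over the strided slices sequence[0::3] and sequence[1::3], letting slicing handle the bounds.
import Mathlib
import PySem

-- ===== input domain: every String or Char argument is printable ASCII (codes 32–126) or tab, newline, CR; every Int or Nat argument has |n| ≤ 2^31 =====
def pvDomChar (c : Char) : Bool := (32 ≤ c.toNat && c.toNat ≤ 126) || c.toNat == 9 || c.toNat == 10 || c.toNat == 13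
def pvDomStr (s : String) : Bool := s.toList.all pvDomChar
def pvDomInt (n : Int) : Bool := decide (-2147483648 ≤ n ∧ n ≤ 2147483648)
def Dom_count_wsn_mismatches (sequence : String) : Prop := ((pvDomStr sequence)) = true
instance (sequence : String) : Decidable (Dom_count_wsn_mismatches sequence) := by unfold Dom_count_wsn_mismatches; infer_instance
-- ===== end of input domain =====

-- B replaces the stride-3 index loop with two independent passes over the strided slices s[0::3] and s[1::3] (idiomatic; same cost).


-- ===== PORT A =====
-- module constants W = set('AT'), S = set('GC')
def pvW : PySem.Set Char := PySem.Set.ofList "AT".toList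
def pvS : PySem.Set Char := PySem.Set.ofList "GC".toList

def count_wsn_mismatches (sequence : String) : Int :=
  let cs := sequence.toList
  let n : Int := PySem.Str.len sequence
  (PySem.List.pyRange 0 n 3).foldl
    (fun mismatches i =>
      let mismatches := if i < n ∧ PySem.List.pyGetD cs i ' ' ∉ pvW then mismatches + 1 else mismatches
      if i + 1 < n ∧ PySem.List.pyGetD cs (i + 1) ' ' ∉ pvS then mismatches + 1 else mismatches)
    0

-- ===== PORT B =====
def count_wsn_mismatches_alt (sequence : String) : Int :=
  let w := (PySem.List.slice? sequence.toList (some 0) none 3).getD []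
  let s := (PySem.List.slice? sequence.toList (some 1) none 3).getD []
  ((w.countP (fun c => decide (c ∉ pvW)) : Nat) : Int)
    + ((s.countP (fun c => decide (c ∉ pvS)) : Nat) : Int)

-- ===== PRECONDITION & SPEC =====
def Spec_count_wsn_mismatches (sequence : String) (out : Int) : Prop := out = count_wsn_mismatches_alt sequence
instance (sequence : String) (out : Int) : Decidable (Spec_count_wsn_mismatches sequence out) := by unfold Spec_count_wsn_mismatches; infer_instance

-- ===== CLAIM (what is proved, stated in full; the proofs are below) =====
def Claim_equal_count_wsn_mismatches : Prop := ∀ (sequence : String), Dom_count_wsn_mismatches sequence → Spec_count_wsn_mismatches sequence (count_wsn_mismatches sequence)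

-- ===== LEMMAS AND PROOFS =====

theorem pvTrim (m m2 : Nat) (P Q : Nat → Prop) [DecidablePred P] [DecidablePred Q]
    (h1 : m2 ≤ m) (h2 : m ≤ m2 + 1)
    (hall : ∀ k, k < m2 → P k) (hnone : ∀ k, m2 ≤ k → ¬ P k) :
    ((List.range m).map (fun k => if P k ∧ Q k then (1:Int) else 0)).sum
      = ((List.range m2).map (fun k => if Q k then (1:Int) else 0)).sum := by
  have hcongr : ((List.range m2).map (fun k => if P k ∧ Q k then (1:Int) else 0))
      = ((List.range m2).map (fun k => if Q k then (1:Int) else 0)) := by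
    apply List.map_congr_left; intro k hk
    rw [List.mem_range] at hk
    simp [hall k hk]
  rcases (by omega : m = m2 ∨ m = m2 + 1) with h | h
  · rw [h, hcongr]
  · rw [h, List.range_succ, List.map_append, List.sum_append, hcongr]
    simp [hnone m2 le_rfl]

theorem pvSlice1 (cs : List Char) (h : 1 ≤ cs.length) :
    (PySem.List.slice? cs (some 1) none 3).getD []
      = List.map (fun k => cs.getD (1+3*k) ' ') (List.range ((cs.length+1)/3)) := by
  simp only [PySem.List.slice?, PySem.List.sliceIndices]
  norm_num
  have hmin : min (1:Int) (cs.length:Int) = 1 := by omega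
  rw [hmin]
  have hcnt : (if 1 < cs.length then (((cs.length:Int) - 1 + 3 - 1) / 3).toNat else 0) = (cs.length+1)/3 := by
    split_ifs <;> omega
  rw [hcnt, ← List.filterMap_eq_map (f := fun k => cs[1+3*k]?.getD ' ')]
  apply List.filterMap_congr
  intro k hk; rw [List.mem_range] at hk
  have h1 : 1 + 3*k < cs.length := by omega
  have h2 : ((1:Int) + 3*(k:Int)).toNat = 1 + 3*k := by omega
  simp [Function.comp, h2, List.getElem?_eq_getElem h1]

theorem pvSlice0 (cs : List Char) (h : 1 ≤ cs.length) :
    (PySem.List.slice? cs (some 0) none 3).getD []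
      = List.map (fun k => cs.getD (3*k) ' ') (List.range ((cs.length+2)/3)) := by
  simp only [PySem.List.slice?, PySem.List.sliceIndices]
  norm_num
  have hcnt : (if 0 < cs.length then (((cs.length:Int) + 3 - 1) / 3).toNat else 0) = (cs.length+2)/3 := by
    split_ifs <;> omega
  rw [hcnt, ← List.filterMap_eq_map (f := fun k => cs[3*k]?.getD ' ')]
  apply List.filterMap_congr
  intro k hk; rw [List.mem_range] at hk
  have h1 : 3*k < cs.length := by omega
  have h2 : ((3:Int)*(k:Int)).toNat = 3*k := by omega
  simp [Function.comp, h2, List.getElem?_eq_getElem h1]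

theorem pvKey (cs : List Char) :
    (PySem.List.pyRange 0 (cs.length : Int) 3).foldl
      (fun mismatches i =>
        let mismatches := if i < (cs.length : Int) ∧ PySem.List.pyGetD cs i ' ' ∉ pvW then mismatches + 1 else mismatches
        if i + 1 < (cs.length : Int) ∧ PySem.List.pyGetD cs (i + 1) ' ' ∉ pvS then mismatches + 1 else mismatches)
      0
    = ((((PySem.List.slice? cs (some 0) none 3).getD []).countP (fun c => decide (c ∉ pvW)) : Nat) : Int)
      + ((((PySem.List.slice? cs (some 1) none 3).getD []).countP (fun c => decide (c ∉ pvS)) : Nat) : Int) := by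
  by_cases hnil : cs = []
  · subst hnil; decide
  · have hL : 1 ≤ cs.length := by
      cases cs with
      | nil => exact absurd rfl hnil
      | cons a t => simp
    -- additive body
    have hbody : (fun (mismatches i : Int) =>
        let mismatches := if i < (cs.length : Int) ∧ PySem.List.pyGetD cs i ' ' ∉ pvW then mismatches + 1 else mismatches
        if i + 1 < (cs.length : Int) ∧ PySem.List.pyGetD cs (i + 1) ' ' ∉ pvS then mismatches + 1 else mismatches)
        = fun mismatches i => mismatches +
            ((if i < (cs.length : Int) ∧ PySem.List.pyGetD cs i ' ' ∉ pvW then (1:Int) else 0)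
             + (if i + 1 < (cs.length : Int) ∧ PySem.List.pyGetD cs (i + 1) ' ' ∉ pvS then (1:Int) else 0)) := by
      funext m i; simp only []; split_ifs <;> ring
    rw [hbody, PySem.List.foldl_add, zero_add]
    rw [PySem.List.pyRange_of_pos 0 (cs.length : Int) (by norm_num), List.map_map]
    have hm : (if (0:Int) < (cs.length : Int) then (((cs.length : Int) - 0 + 3 - 1) / 3).toNat else 0)
        = (cs.length + 2) / 3 := by
      rw [if_pos (by exact_mod_cast hL)]; omega
    rw [hm]
    simp only [Function.comp_def, zero_add]
    rw [PySem.List.sum_map_add_int]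
    have hs1 : (List.map (fun k : Nat => if (3*(k:Int)) < (cs.length:Int) ∧ PySem.List.pyGetD cs (3*(k:Int)) ' ' ∉ pvW then (1:Int) else 0) (List.range ((cs.length+2)/3))).sum
        = (List.map (fun k : Nat => if PySem.List.pyGetD cs (3*(k:Int)) ' ' ∉ pvW then (1:Int) else 0) (List.range ((cs.length+2)/3))).sum :=
      pvTrim _ _ _ _ le_rfl (by omega) (fun k hk => by omega) (fun k hk => by omega)
    have hs2 : (List.map (fun k : Nat => if (3*(k:Int)) + 1 < (cs.length:Int) ∧ PySem.List.pyGetD cs ((3*(k:Int)) + 1) ' ' ∉ pvS then (1:Int) else 0) (List.range ((cs.length+2)/3))).sum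
        = (List.map (fun k : Nat => if PySem.List.pyGetD cs ((3*(k:Int)) + 1) ' ' ∉ pvS then (1:Int) else 0) (List.range ((cs.length+1)/3))).sum :=
      pvTrim _ _ _ _ (by omega) (by omega) (fun k hk => by omega) (fun k hk => by omega)
    rw [hs1, hs2, pvSlice0 cs hL, pvSlice1 cs hL, List.countP_map, List.countP_map,
      ← PySem.List.sum_map_ite_one_zero, ← PySem.List.sum_map_ite_one_zero]
    congr 1
    · apply congrArg; apply List.map_congr_left; intro k hk
      have e : (3*(k:Int)) = ((3*k : Nat):Int) := by push_cast; ring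
      rw [e, PySem.List.pyGetD_natCast]
      simp [Function.comp]
    · apply congrArg; apply List.map_congr_left; intro k hk
      have e : (3*(k:Int)) + 1 = ((1 + 3*k : Nat):Int) := by push_cast; ring
      rw [e, PySem.List.pyGetD_natCast]
      simp [Function.comp]

-- ===== VERDICT (by name: the statement is the Claim_ definition above) =====
theorem count_wsn_mismatches_spec : Claim_equal_count_wsn_mismatches := by
  intro s _
  unfold Spec_count_wsn_mismatches count_wsn_mismatches count_wsn_mismatches_alt
  simp only [PySem.Str.len_eq]
  exact pvKey s.toList
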